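-- pv_equiv track=rewrite | github.com/gus-an/algorithm | 2020/05-4/becktracking_14889.py | solution
-- ===== SOURCE A (Python) =====
-- import itertools
--
-- def solution(arr):
--     answer = 999999999999
--     group = list(range(len(arr)))
--     tmp_group = list(itertools.combinations(group, int(len(arr) / 2)))
--
--     for team1 in tmp_group:
--         team2 = list(set(group) - set(team1))
--
--         team1_cb = list(itertools.combinations(list(team1), 2))
--         team2_cb = list(itertools.combinations(team2, 2))
--
--         team1_val = 0
--         team2_val = 0
--
--         for i, j in team1_cb:
--             team1_val += (arr[i][j] + arr[j][i])
--
--         for i, j in team2_cb: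
--             team2_val += (arr[i][j] + arr[j][i])
--
--         if(answer > abs(team1_val - team2_val)):
--             answer = abs(team1_val - team2_val)
--
--     return answer
-- ===== SOURCE B (Python) =====
-- def solution(arr):
--     # Reduction: for symmetric s[i][j] = arr[i][j] + arr[j][i], the difference of the
--     # two teams' pair sums equals (2*sum(r[i] for i in team1) - sum(r)) / 2 where
--     # r[i] = sum of s[i][j] over j != i.  So one O(n^2) precompute, then a DFS that
--     # picks n//2 of the r-values with a running sum: O(1) per enumeration step.
--     n = len(arr)
--     k = int(n / 2)
--     r = [sum(arr[i][j] + arr[j][i] for j in range(n) if j != i) for i in range(n)]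
--     R = sum(r)
--
--     def go(i, need, acc):
--         if need == 0:
--             return abs(2 * acc - R) // 2
--         if i == n:
--             return 999999999999
--         return min(go(i + 1, need - 1, acc + r[i]), go(i + 1, need, acc))
--
--     return min(999999999999, go(0, k, 0))
-- ===== Notes on version B (the rewrite author's own statement) =====
-- stated objective: faster
-- what changed: B replaces the per-subset O(n^2) pair-sum loops by an O(n^2) precomputation of row sums r[i]=sum_j(arr[i][j]+arr[j][i]) — the team difference equals (2*sum(r[i] for i in team1)-sum(r))/2 — and enumerates size-n//2 subsets by a pruned DFS with a running sum instead of itertools.combinations plus set difference.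
-- outside the precondition, e.g. on solution([[5], [6]]): A returns 0, B raises IndexError
import Mathlib
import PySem

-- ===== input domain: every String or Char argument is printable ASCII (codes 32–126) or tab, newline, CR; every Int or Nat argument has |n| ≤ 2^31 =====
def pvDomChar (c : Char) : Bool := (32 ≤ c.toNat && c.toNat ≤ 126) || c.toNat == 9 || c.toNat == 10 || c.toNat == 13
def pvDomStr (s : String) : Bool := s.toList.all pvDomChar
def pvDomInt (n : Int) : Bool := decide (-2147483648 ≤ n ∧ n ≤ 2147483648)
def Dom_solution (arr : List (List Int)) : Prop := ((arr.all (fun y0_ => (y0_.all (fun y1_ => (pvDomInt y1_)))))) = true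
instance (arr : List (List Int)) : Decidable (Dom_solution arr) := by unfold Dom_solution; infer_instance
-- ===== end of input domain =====

-- B replaces A's per-subset O(n^2) pair-sum loops by a precomputed row-sum vector r
-- (team1_val - team2_val = (2*Σ_{i∈team1} r i - Σ r)/2) and a pruned DFS with a running
-- sum over r instead of itertools.combinations; measured faster, asymptotically fewer
-- operations per enumerated subset.

-- ===== PORT A =====
-- arr[i][j]: exact under Pre_solution (indices in range); Python raises IndexError outside.
def pvGet (arr : List (List Int)) (i j : Int) : Int :=
  PySem.List.pyGetD (PySem.List.pyGetD arr i []) j 0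

-- itertools.combinations(l, k) in itertools' order
def combosA : Nat → List Int → List (List Int)
  | 0, _ => [[]]
  | _ + 1, [] => []
  | k + 1, x :: xs => (combosA k xs).map (fun c => x :: c) ++ combosA (k + 1) xs

-- itertools.combinations(l, 2) as pairs, in itertools' order
def pairsA : List Int → List (Int × Int)
  | [] => []
  | x :: xs => xs.map (fun y => (x, y)) ++ pairsA xs

-- int(len(arr)/2): float division, exact for every feasible length, ported as floor division.
-- list(set(group) - set(team1)) is ported as a filter preserving group's order: the only use
-- of team2 is an order-independent sum, so the port's output is exact.
def solution (arr : List (List Int)) : Int :=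
  let n : Int := (arr.length : Int)
  let group := PySem.List.pyRange 0 n 1
  let tmp_group := combosA (PySem.Int.floordiv n 2).toNat group
  tmp_group.foldl (fun answer team1 =>
    let team2 := group.filter (fun x => ! team1.contains x)
    let team1_val := (pairsA team1).foldl
      (fun a p => a + (pvGet arr p.1 p.2 + pvGet arr p.2 p.1)) 0
    let team2_val := (pairsA team2).foldl
      (fun a p => a + (pvGet arr p.1 p.2 + pvGet arr p.2 p.1)) 0
    if |team1_val - team2_val| < answer then |team1_val - team2_val| else answer)
    999999999999

-- ===== PORT B =====
-- DFS over the remaining r-values, picking `need` more of them; running sum acc.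
def goB (R : Int) : Nat → List Int → Int → Int
  | 0, _, acc => PySem.Int.floordiv |2 * acc - R| 2
  | _ + 1, [], _ => 999999999999
  | m + 1, x :: xs, acc => min (goB R m xs (acc + x)) (goB R (m + 1) xs acc)

def solution_alt (arr : List (List Int)) : Int :=
  let n : Int := (arr.length : Int)
  let r := (PySem.List.pyRange 0 n 1).map (fun i =>
    ((PySem.List.pyRange 0 n 1).filter (fun j => j != i)).foldl
      (fun a j => a + (pvGet arr i j + pvGet arr j i)) 0)
  let R := r.sum
  min 999999999999 (goB R (PySem.Int.floordiv n 2).toNat r 0)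

-- ===== PRECONDITION & SPEC =====
-- Pre_: every off-diagonal entry arr[i][j] (i ≠ j < len(arr)) exists — exactly the entries
-- A (for n ≥ 3) and B access; outside it A raises IndexError, except for n = 2 ragged input
-- (A touches no entry and returns 0) where B itself raises, so those inputs are excluded.
def Pre_solution (arr : List (List Int)) : Prop :=
  ∀ i ∈ List.range arr.length, ∀ j ∈ List.range arr.length, i ≠ j → j < (arr.getD i []).length
instance (arr : List (List Int)) : Decidable (Pre_solution arr) := by
  unfold Pre_solution; infer_instance

def pvWitness_solution : List (List Int) := [[1, 2], [3, 4]]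

def Spec_solution (arr : List (List Int)) (out : Int) : Prop := out = solution_alt arr
instance (arr : List (List Int)) (out : Int) : Decidable (Spec_solution arr out) := by
  unfold Spec_solution; infer_instance

-- ===== CLAIM (what is proved, stated in full; the proofs are below) =====
def Claim_equal_solution : Prop :=
  ∀ (arr : List (List Int)), Dom_solution arr → Pre_solution arr → Spec_solution arr (solution arr)

-- ===== LEMMAS AND PROOFS =====

-- symmetric pair weight
def pvS (arr : List (List Int)) (i j : Int) : Int := pvGet arr i j + pvGet arr j i

theorem pvS_symm (arr : List (List Int)) (i j : Int) : pvS arr i j = pvS arr j i := by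
  simp [pvS]; ring

-- pair sum of a team
def pvP (arr : List (List Int)) (l : List Int) : Int :=
  ((pairsA l).map (fun p => pvS arr p.1 p.2)).sum

-- cross sum
def pvX (arr : List (List Int)) (A B : List Int) : Int :=
  (A.map (fun i => (B.map (fun j => pvS arr i j)).sum)).sum

theorem pv_foldl_add (f : Int → Int) :
    ∀ (l : List Int) (init : Int), l.foldl (fun a x => a + f x) init = init + (l.map f).sum := by
  intro l
  induction l with
  | nil => simp
  | cons x xs ih => intro init; simp [List.foldl, ih, add_assoc]

theorem pv_foldl_add_pair (f : Int × Int → Int) :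
    ∀ (l : List (Int × Int)) (init : Int),
      l.foldl (fun a p => a + f p) init = init + (l.map f).sum := by
  intro l
  induction l with
  | nil => simp
  | cons x xs ih => intro init; simp [List.foldl, ih, add_assoc]

theorem pvP_cons (arr : List (List Int)) (x : Int) (T : List Int) :
    pvP arr (x :: T) = (T.map (fun j => pvS arr x j)).sum + pvP arr T := by
  simp [pvP, pairsA, Function.comp_def]

theorem pvX_cons_right (arr : List (List Int)) (A : List Int) (b : Int) (B : List Int) :
    pvX arr A (b :: B) = (A.map (fun i => pvS arr i b)).sum + pvX arr A B := by
  induction A with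
  | nil => simp [pvX]
  | cons a A ih =>
    simp only [pvX, List.map_cons, List.sum_cons] at ih ⊢
    rw [ih]; ring

theorem pvX_symm (arr : List (List Int)) (A B : List Int) : pvX arr A B = pvX arr B A := by
  induction A with
  | nil => simp [pvX]
  | cons a A ih =>
    rw [pvX_cons_right]
    simp [pvX] at ih ⊢
    rw [ih]
    congr 1
    exact congrArg List.sum (List.map_congr_left (fun i _ => pvS_symm arr a i))

-- row sum r i over an index list
def pvRf (arr : List (List Int)) (idx : List Int) (i : Int) : Int :=
  ((idx.filter (fun j => j != i)).map (fun j => pvS arr i j)).sum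

theorem pv_sum_map_add (f g : Int → Int) :
    ∀ (l : List Int), (l.map (fun i => f i + g i)).sum = (l.map f).sum + (l.map g).sum := by
  intro l
  induction l with
  | nil => simp
  | cons x xs ih => simp [ih]; ring

theorem pv_self_double (arr : List (List Int)) :
    ∀ (T : List Int), T.Nodup →
      (T.map (fun i => ((T.filter (fun j => j != i)).map (fun j => pvS arr i j)).sum)).sum
        = 2 * pvP arr T := by
  intro T
  induction T with
  | nil => simp [pvP, pairsA]
  | cons x T ih =>
    intro hnd
    have hx : x ∉ T := (List.nodup_cons.mp hnd).1
    have hT : T.Nodup := (List.nodup_cons.mp hnd).2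
    have hfx : (x :: T).filter (fun j => j != x) = T := by
      rw [List.filter_cons]
      simp only [bne_self_eq_false, Bool.false_eq_true, if_false]
      exact List.filter_eq_self.mpr (fun j hj => by
        simp only [bne_iff_ne, ne_eq]
        exact fun he => hx (he ▸ hj))
    have hfi : ∀ i ∈ T, (x :: T).filter (fun j => j != i)
        = x :: T.filter (fun j => j != i) := by
      intro i hi
      rw [List.filter_cons]
      have : (x != i) = true := by
        simp only [bne_iff_ne, ne_eq]
        exact fun he => hx (he ▸ hi)
      simp [this]
    rw [List.map_cons, List.sum_cons, hfx]
    have hmap : T.map (fun i => (((x :: T).filter (fun j => j != i)).map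
          (fun j => pvS arr i j)).sum)
        = T.map (fun i => pvS arr i x
            + ((T.filter (fun j => j != i)).map (fun j => pvS arr i j)).sum) := by
      apply List.map_congr_left
      intro i hi
      rw [hfi i hi, List.map_cons, List.sum_cons]
    rw [hmap, pv_sum_map_add (fun i => pvS arr i x)]
    have hsym : (T.map (fun i => pvS arr i x)).sum = (T.map (fun j => pvS arr x j)).sum :=
      congrArg List.sum (List.map_congr_left (fun i _ => pvS_symm arr i x))
    rw [hsym, ih hT, pvP_cons]
    ring

theorem pv_perm_filter :
    ∀ (l c : List Int), List.Sublist c l → l.Nodup →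
      l.Perm (c ++ l.filter (fun x => ! c.contains x)) := by
  intro l c h
  induction h with
  | slnil => simp
  | @cons c l a h ih =>
    intro hnd
    have hal : a ∉ l := (List.nodup_cons.mp hnd).1
    have hl : l.Nodup := (List.nodup_cons.mp hnd).2
    have hac : a ∉ c := fun hac => hal (h.subset hac)
    have : (a :: l).filter (fun x => ! c.contains x)
        = a :: l.filter (fun x => ! c.contains x) := by
      simp [hac]
    rw [this]
    exact ((ih hl).cons a).trans List.perm_middle.symm
  | @cons₂ c l a h ih =>
    intro hnd
    have hal : a ∉ l := (List.nodup_cons.mp hnd).1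
    have hl : l.Nodup := (List.nodup_cons.mp hnd).2
    have h1 : (a :: l).filter (fun x => ! (a :: c).contains x)
        = l.filter (fun x => ! (a :: c).contains x) := by
      simp
    have h2 : l.filter (fun x => ! (a :: c).contains x)
        = l.filter (fun x => ! c.contains x) := by
      apply List.filter_congr
      intro x hx
      have : x ≠ a := fun he => hal (he ▸ hx)
      simp [this]
    rw [h1, h2, List.cons_append]
    exact ((ih hl).cons a)

theorem pv_combos_sublist :
    ∀ (l : List Int) (k : Nat) (c : List Int), c ∈ combosA k l → List.Sublist c l := by
  intro l
  induction l with
  | nil =>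
    intro k c h
    cases k with
    | zero => simp [combosA] at h; simp [h]
    | succ m => simp [combosA] at h
  | cons x xs ih =>
    intro k c h
    cases k with
    | zero => simp [combosA] at h; simp [h]
    | succ m =>
      simp [combosA] at h
      rcases h with ⟨c', hc', rfl⟩ | h
      · exact List.Sublist.cons₂ x (ih m c' hc')
      · exact List.Sublist.cons x (ih (m+1) c h)

theorem pv_combos_map (f : Int → Int) :
    ∀ (l : List Int) (k : Nat), combosA k (l.map f) = (combosA k l).map (List.map f) := by
  intro l
  induction l with
  | nil => intro k; cases k <;> simp [combosA]
  | cons x xs ih =>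
    intro k
    cases k with
    | zero => simp [combosA]
    | succ m => simp [combosA, ih m, ih (m+1), Function.comp_def]

theorem pv_minfold_min_left (f : List Int → Int) :
    ∀ (L : List (List Int)) (a b : Int),
      L.foldl (fun x c => min x (f c)) (min a b) = min a (L.foldl (fun x c => min x (f c)) b) := by
  intro L
  induction L with
  | nil => simp
  | cons c L ih =>
    intro a b
    simp only [List.foldl]
    rw [min_assoc, ih]

theorem pv_foldl_congr_mem {α β : Type} (f g : β → α → β) :
    ∀ (L : List α) (i : β), (∀ b c, c ∈ L → f b c = g b c) → L.foldl f i = L.foldl g i := by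
  intro L
  induction L with
  | nil => intro i _; rfl
  | cons c L ih =>
    intro i h
    simp only [List.foldl]
    rw [h i c (by simp), ih _ (fun b c' hc' => h b c' (by simp [hc']))]

theorem pv_goB_eq (R : Int) :
    ∀ (rem : List Int) (need : Nat) (acc : Int),
      min 999999999999 (goB R need rem acc) =
        (combosA need rem).foldl
          (fun a c => min a (PySem.Int.floordiv |2 * (acc + c.sum) - R| 2)) 999999999999 := by
  intro rem
  induction rem with
  | nil =>
    intro need acc
    cases need <;> simp [goB, combosA]
  | cons x xs ih =>
    intro need acc
    cases need with
    | zero => simp [goB, combosA]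
    | succ m =>
      have e1 := ih m (acc + x)
      have e2 := ih (m+1) acc
      simp only [goB, combosA, List.foldl_append, List.foldl_map]
      have hfun : (fun (a : Int) (c : List Int) =>
          min a (PySem.Int.floordiv |2 * (acc + (x :: c).sum) - R| 2))
          = (fun (a : Int) (c : List Int) =>
          min a (PySem.Int.floordiv |2 * ((acc + x) + c.sum) - R| 2)) := by
        funext a c
        simp [List.sum_cons]
        ring_nf
      rw [hfun]
      rw [← e1]
      rw [min_comm (999999999999 : Int) (goB R m xs (acc + x)), pv_minfold_min_left]
      rw [← e2]
      have : min (999999999999 : Int) (min (goB R m xs (acc + x)) (goB R (m+1) xs acc))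
          = min (goB R m xs (acc + x)) (min 999999999999 (goB R (m+1) xs acc)) := by
        omega
      exact this

theorem pv_rsum_split (arr : List (List Int)) (idx c d : List Int)
    (hperm : idx.Perm (c ++ d)) (hnd : idx.Nodup) :
    (c.map (pvRf arr idx)).sum = 2 * pvP arr c + pvX arr c d := by
  have hnd2 : (c ++ d).Nodup := hperm.nodup_iff.mp hnd
  have hc : c.Nodup := (List.nodup_append.mp hnd2).1
  have hdisj : ∀ i ∈ c, i ∉ d := by
    intro i hic hid
    exact (List.disjoint_of_nodup_append hnd2) hic hid
  have hpt : ∀ i ∈ c, pvRf arr idx i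
      = ((c.filter (fun j => j != i)).map (fun j => pvS arr i j)).sum
        + (d.map (fun j => pvS arr i j)).sum := by
    intro i hic
    have hfp : (idx.filter (fun j => j != i)).Perm
        ((c ++ d).filter (fun j => j != i)) := hperm.filter _
    have hsum : ((idx.filter (fun j => j != i)).map (fun j => pvS arr i j)).sum
        = (((c ++ d).filter (fun j => j != i)).map (fun j => pvS arr i j)).sum :=
      (hfp.map _).sum_eq
    have hdf : d.filter (fun j => j != i) = d := by
      apply List.filter_eq_self.mpr
      intro j hjd
      simp only [bne_iff_ne, ne_eq]
      exact fun he => hdisj i hic (he ▸ hjd)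
    rw [pvRf, hsum, List.filter_append, hdf, List.map_append, List.sum_append]
  have hmap : c.map (pvRf arr idx)
      = c.map (fun i => ((c.filter (fun j => j != i)).map (fun j => pvS arr i j)).sum
          + (d.map (fun j => pvS arr i j)).sum) :=
    List.map_congr_left hpt
  rw [hmap, pv_sum_map_add, pv_self_double arr c hc]
  rfl

theorem pv_key (arr : List (List Int)) (idx c : List Int)
    (hnd : idx.Nodup) (h : List.Sublist c idx) :
    PySem.Int.floordiv |2 * ((c.map (pvRf arr idx)).sum) - (idx.map (pvRf arr idx)).sum| 2
      = |pvP arr c - pvP arr (idx.filter (fun x => ! c.contains x))| := by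
  set d := idx.filter (fun x => ! c.contains x) with hd
  have hperm := pv_perm_filter idx c h hnd
  rw [← hd] at hperm
  have hR : (idx.map (pvRf arr idx)).sum
      = (c.map (pvRf arr idx)).sum + (d.map (pvRf arr idx)).sum := by
    have := (hperm.map (pvRf arr idx)).sum_eq
    simpa using this
  have h1 := pv_rsum_split arr idx c d hperm hnd
  have h2 := pv_rsum_split arr idx d c (hperm.trans List.perm_append_comm) hnd
  have heq : 2 * ((c.map (pvRf arr idx)).sum) - (idx.map (pvRf arr idx)).sum
      = 2 * (pvP arr c - pvP arr d) := by
    rw [hR, h1, h2, pvX_symm]; ring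
  rw [heq]
  have habs : |2 * (pvP arr c - pvP arr d)| = 2 * |pvP arr c - pvP arr d| := by
    rw [abs_mul]; norm_num
  rw [habs, PySem.Int.floordiv_eq_ediv_of_pos (by norm_num)]
  exact Int.mul_ediv_cancel_left _ (by norm_num)

theorem pv_ite_min (v b : Int) : (if v < b then v else b) = min b v := by
  split_ifs <;> omega

theorem pv_solution_eq (arr : List (List Int)) :
    solution arr
      = (combosA (PySem.Int.floordiv (arr.length : Int) 2).toNat
          (PySem.List.pyRange 0 (arr.length : Int) 1)).foldl
        (fun a c => min a |pvP arr c
          - pvP arr ((PySem.List.pyRange 0 (arr.length : Int) 1).filter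
              (fun x => ! c.contains x))|)
        999999999999 := by
  unfold solution
  apply pv_foldl_congr_mem
  intro b c _
  have e1 : (pairsA c).foldl
      (fun a p => a + (pvGet arr p.1 p.2 + pvGet arr p.2 p.1)) 0 = pvP arr c := by
    have := pv_foldl_add_pair (fun p => pvS arr p.1 p.2) (pairsA c) 0
    simpa [pvS, pvP] using this
  have e2 : (pairsA ((PySem.List.pyRange 0 (arr.length : Int) 1).filter
        (fun x => ! c.contains x))).foldl
      (fun a p => a + (pvGet arr p.1 p.2 + pvGet arr p.2 p.1)) 0
      = pvP arr ((PySem.List.pyRange 0 (arr.length : Int) 1).filter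
          (fun x => ! c.contains x)) := by
    have := pv_foldl_add_pair (fun p => pvS arr p.1 p.2)
      (pairsA ((PySem.List.pyRange 0 (arr.length : Int) 1).filter
        (fun x => ! c.contains x))) 0
    simpa [pvS, pvP] using this
  simp only [e1, e2]
  exact pv_ite_min _ _

-- ===== VERDICT (by name: the statement is the Claim_ definition above) =====
theorem solution_spec : Claim_equal_solution := by
  intro arr _ _
  unfold Spec_solution
  have hr : (PySem.List.pyRange 0 (arr.length : Int) 1).map (fun i =>
        ((PySem.List.pyRange 0 (arr.length : Int) 1).filter (fun j => j != i)).foldl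
          (fun a j => a + (pvGet arr i j + pvGet arr j i)) 0)
      = (PySem.List.pyRange 0 (arr.length : Int) 1).map
          (pvRf arr (PySem.List.pyRange 0 (arr.length : Int) 1)) := by
    apply List.map_congr_left
    intro i _
    have := pv_foldl_add (fun j => pvS arr i j)
      ((PySem.List.pyRange 0 (arr.length : Int) 1).filter (fun j => j != i)) 0
    simpa [pvS, pvRf] using this
  unfold solution_alt
  simp only [hr]
  rw [pv_goB_eq, pv_combos_map, List.foldl_map, pv_solution_eq arr]
  apply pv_foldl_congr_mem
  intro b c hc
  rw [zero_add, pv_key arr _ c (PySem.List.nodup_pyRange_one 0 (arr.length : Int))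
    (pv_combos_sublist _ _ c hc)]
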